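-- pv_equiv track=rewrite | github.com/ann-exe/MyProjects | Cosmetic Data Analysis/Data_update_integrated.py | preprocessing_text_list
-- ===== SOURCE A (Python) =====
-- def preprocessing_text_list(txt_list):
--     while "" in txt_list:
--         txt_list.remove("")
--     else:
--         for txt_index in range(len(txt_list)):
--             txt = txt_list[txt_index]
--             txt = txt.replace(".", "").replace(" : ", ": ")
--             txt_list[txt_index] = txt
--     return txt_list
-- ===== SOURCE B (Python) =====
-- def preprocessing_text_list(txt_list):
--     # Single-pass in-place compaction with a write cursor (mutates the same list, like A).
--     w = 0
--     for r in range(len(txt_list)):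
--         t = txt_list[r]
--         if t != "":
--             txt_list[w] = t.replace(".", "").replace(" : ", ": ")
--             w += 1
--     del txt_list[w:]
--     return txt_list
-- ===== Notes on version B (the rewrite author's own statement) =====
-- stated objective: alternative
-- what changed: Replaces A's repeated 'while "" in list: remove("")' scan-and-remove followed by a second index-mapping pass with a single in-place two-cursor compaction pass that skips originally-empty entries, writes the transformed string at the write cursor and truncates the stale tail; it trades the two-phase filter-then-map for one pass.
import Mathlib
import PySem

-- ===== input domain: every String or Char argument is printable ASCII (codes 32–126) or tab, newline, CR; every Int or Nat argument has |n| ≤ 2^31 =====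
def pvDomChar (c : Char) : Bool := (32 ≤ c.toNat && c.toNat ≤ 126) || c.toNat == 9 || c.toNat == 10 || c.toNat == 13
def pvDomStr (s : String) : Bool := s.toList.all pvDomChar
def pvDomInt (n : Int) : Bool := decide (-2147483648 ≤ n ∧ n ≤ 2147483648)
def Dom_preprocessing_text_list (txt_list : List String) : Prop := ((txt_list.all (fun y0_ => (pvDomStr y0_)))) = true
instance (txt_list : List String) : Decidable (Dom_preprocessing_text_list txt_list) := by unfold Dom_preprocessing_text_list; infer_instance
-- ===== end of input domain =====

-- ===== PORT A =====
-- header: B compacts in place in one pass (write cursor) instead of A's repeated remove("") then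
-- an index-mapping loop; equivalence proved about the RETURN value (both Pythons mutate the argument).
-- txt.replace(".", "").replace(" : ", ": ")
def pvTransform (t : String) : String :=
  PySem.Str.replace (PySem.Str.replace t "." "") " : " ": "

-- while "" in txt_list: txt_list.remove("")   (remove deletes the first occurrence)
def pvRemoveEmpty (xs : List String) : List String :=
  if _h : "" ∈ xs then
    pvRemoveEmpty (xs.erase "")   -- PySem.List.remove? xs "" = some (xs.erase "") when "" ∈ xs (remove?_eq_some_erase)
  else xs
termination_by xs.length
decreasing_by
  have h1 := List.length_erase_of_mem _h
  have h2 := List.length_pos_of_mem _h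
  omega

-- for txt_index in range(len(txt_list)): txt_list[txt_index] = transform(txt_list[txt_index])
def pvMapLoop (buf : List String) (n i : Nat) : List String :=
  if i < n then
    pvMapLoop (buf.set i (pvTransform (buf.getD i ""))) n (i + 1)   -- index i is in range, so getD/set are exact
  else buf
termination_by n - i

def preprocessing_text_list (txt_list : List String) : List String :=
  let ys := pvRemoveEmpty txt_list
  pvMapLoop ys ys.length 0

-- ===== PORT B =====
-- single pass: read cursor r, write cursor w; originally-empty entries are skipped, the rest are
-- transformed and written at w; finally del txt_list[w:] drops the stale tail.
def pvAltLoop (buf : List String) (n r w : Nat) : List String × Nat :=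
  if r < n then
    let t := buf.getD r ""          -- r in range: exact for txt_list[r]
    if t ≠ "" then
      pvAltLoop (buf.set w (pvTransform t)) n (r + 1) (w + 1)
    else
      pvAltLoop buf n (r + 1) w
  else (buf, w)
termination_by n - r

def preprocessing_text_list_alt (txt_list : List String) : List String :=
  let p := pvAltLoop txt_list txt_list.length 0 0
  p.1.take p.2                      -- del txt_list[w:]

-- ===== PRECONDITION & SPEC =====
def Spec_preprocessing_text_list (txt_list : List String) (out : List String) : Prop := out = preprocessing_text_list_alt txt_list
instance (txt_list : List String) (out : List String) : Decidable (Spec_preprocessing_text_list txt_list out) := by unfold Spec_preprocessing_text_list; infer_instance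

-- ===== CLAIM (what is proved, stated in full; the proofs are below) =====
def Claim_equal_preprocessing_text_list : Prop := ∀ (txt_list : List String), Dom_preprocessing_text_list txt_list → Spec_preprocessing_text_list txt_list (preprocessing_text_list txt_list)

-- ===== LEMMAS AND PROOFS =====
def pvF (xs : List String) : List String :=
  (xs.filter (fun s => s ≠ "")).map pvTransform

lemma pvFilter_erase_empty (xs : List String) (p : String → Bool) (hp : p "" = false) :
    (xs.erase "").filter p = xs.filter p := by
  induction xs with
  | nil => rfl
  | cons x xs ih =>
    by_cases hx : x = ""
    · subst hx; simp [hp]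
    · rw [List.erase_cons]; simp [hx, List.filter_cons, ih]

lemma pvRemoveEmpty_eq_filter (xs : List String) :
    pvRemoveEmpty xs = xs.filter (fun s => s ≠ "") := by
  induction hn : xs.length using Nat.strong_induction_on generalizing xs with
  | _ n ih =>
    rw [pvRemoveEmpty]
    split
    · next h =>
      subst hn
      rw [ih (xs.erase "").length
        (by have h1 := List.length_erase_of_mem h; have h2 := List.length_pos_of_mem h; omega) _ rfl]
      exact pvFilter_erase_empty xs _ (by simp)
    · next h =>
      symm
      refine List.filter_eq_self.mpr ?_
      intro a ha
      have hne : a ≠ "" := fun he => h (he ▸ ha)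
      simp [hne]

lemma pvTake_set_succ {α : Type} (xs : List α) (w : Nat) (a : α) (h : w < xs.length) :
    (xs.set w a).take (w + 1) = xs.take w ++ [a] := by
  rw [List.set_eq_take_append_cons_drop, if_pos h]
  have hl : (xs.take w).length = w := by simp [Nat.le_of_lt h]
  rw [show w + 1 = (xs.take w).length + 1 by rw [hl], List.take_append]
  simp

lemma pvMapLoop_spec : ∀ (k i : Nat) (buf : List String),
    i + k = buf.length →
    pvMapLoop buf buf.length i = buf.take i ++ (buf.drop i).map pvTransform := by
  intro k
  induction k with
  | zero =>
    intro i buf h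
    rw [pvMapLoop]
    simp [show ¬ i < buf.length by omega, show buf.length ≤ i by omega,
      List.drop_of_length_le, List.take_of_length_le]
  | succ k ih =>
    intro i buf h
    have hi : i < buf.length := by omega
    rw [pvMapLoop, if_pos hi]
    have hlen : (buf.set i (pvTransform (buf.getD i ""))).length = buf.length := by simp
    have := ih (i + 1) (buf.set i (pvTransform (buf.getD i ""))) (by rw [hlen]; omega)
    rw [hlen] at this
    rw [this]
    have hg : buf.getD i "" = buf[i] := List.getD_eq_getElem buf "" hi
    rw [List.drop_set_of_lt (by omega), pvTake_set_succ _ _ _ (by simpa using hi), hg,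
      show List.drop i buf = buf[i] :: List.drop (i + 1) buf from List.drop_eq_getElem_cons hi]
    simp
    rw [List.drop_eq_getElem_cons (show i < (List.map pvTransform buf).length by simpa using hi)]
    simp

lemma pvAltLoop_spec : ∀ (k r w : Nat) (buf orig : List String),
    r + k = orig.length →
    w ≤ r →
    buf.length = orig.length →
    buf.drop r = orig.drop r →
    buf.take w = pvF (orig.take r) →
    (pvAltLoop buf orig.length r w).1.take (pvAltLoop buf orig.length r w).2 = pvF orig := by
  intro k
  induction k with
  | zero =>
    intro r w buf orig hk hw hlen hdrop htake
    rw [pvAltLoop]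
    simp only [show ¬ r < orig.length by omega, if_false]
    rw [htake, List.take_of_length_le (by omega)]
  | succ k ih =>
    intro r w buf orig hk hw hlen hdrop htake
    have hr : r < orig.length := by omega
    have hrb : r < buf.length := by omega
    have hg : buf.getD r "" = buf[r] := List.getD_eq_getElem buf "" hrb
    have hbo : buf[r] = orig[r]'hr := by
      have hq : buf[r]? = orig[r]? := by
        rw [← List.head?_drop, ← List.head?_drop, hdrop]
      simpa [List.getElem?_eq_getElem, hrb, hr] using hq
    have htakeR : pvF (orig.take (r + 1)) =
        pvF (orig.take r) ++ (if orig[r]'hr ≠ "" then [pvTransform (orig[r]'hr)] else []) := by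
      rw [List.take_succ_eq_append_getElem hr]
      unfold pvF
      rw [List.filter_append, List.map_append]
      congr 1
      by_cases hne : orig[r]'hr = "" <;> simp [hne]
    rw [pvAltLoop, if_pos hr]
    simp only [hg, hbo]
    by_cases hne : orig[r]'hr = ""
    · simp only [hne, ne_eq, not_true_eq_false, if_false]
      refine ih (r + 1) w buf orig (by omega) (by omega) hlen ?_ ?_
      · calc buf.drop (r + 1) = (buf.drop r).drop 1 := by rw [List.drop_drop]
          _ = (orig.drop r).drop 1 := by rw [hdrop]
          _ = orig.drop (r + 1) := by rw [List.drop_drop]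
      · rw [htake, htakeR, hne]; simp
    · simp only [hne, ne_eq, not_false_eq_true, if_true]
      have hwb : w < buf.length := by omega
      refine ih (r + 1) (w + 1) (buf.set w (pvTransform (orig[r]'hr))) orig (by omega)
        (by omega) (by simpa using hlen) ?_ ?_
      · rw [List.drop_set_of_lt (by omega)]
        calc buf.drop (r + 1) = (buf.drop r).drop 1 := by rw [List.drop_drop]
          _ = (orig.drop r).drop 1 := by rw [hdrop]
          _ = orig.drop (r + 1) := by rw [List.drop_drop]
      · rw [pvTake_set_succ _ _ _ hwb, htake, htakeR]
        simp [hne]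

lemma pvA_eq (xs : List String) : preprocessing_text_list xs = pvF xs := by
  unfold preprocessing_text_list
  rw [pvMapLoop_spec (pvRemoveEmpty xs).length 0 _ (by omega)]
  simp [pvRemoveEmpty_eq_filter, pvF]

lemma pvB_eq (xs : List String) : preprocessing_text_list_alt xs = pvF xs := by
  unfold preprocessing_text_list_alt
  exact pvAltLoop_spec xs.length 0 0 xs xs (by omega) (by omega) rfl rfl (by simp [pvF])

-- ===== VERDICT (by name: the statement is the Claim_ definition above) =====
theorem preprocessing_text_list_spec : Claim_equal_preprocessing_text_list := by
  intro xs _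
  unfold Spec_preprocessing_text_list
  rw [pvA_eq, pvB_eq]
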